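-- pv_equiv track=rewrite | github.com/timisaurus/workspace-python-Hello_world | edx/edx_list_slicing.py | sum_odd_int
-- ===== SOURCE A (Python) =====
-- def sum_odd_int(input_list_a, input_list_b):
--     lenght_list_a = len(input_list_a)
--     lenght_list_b = len(input_list_b)
--     output_odd_int = 0
--     if lenght_list_a >= lenght_list_b:
--         for element_a in input_list_a:
--             if len(input_list_b) > 0:
--                 element_b_use = input_list_b.pop(0)
--                 if element_b_use % 2 == 0:
--                     pass
--                 else:
--                     output_odd_int += element_b_use
--             if element_a % 2 == 0:
--                 pass
--             else:
--                 output_odd_int += element_a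
--     else:
--         for element_b in input_list_b:
--             if len(input_list_a) > 0:
--                 element_a_use = input_list_a.pop(0)
--                 if element_a_use % 2 == 0:
--                     pass
--                 else:
--                     output_odd_int += element_a_use
--             if element_b % 2 == 0:
--                 pass
--             else:
--                 output_odd_int += element_b
--     return output_odd_int
-- ===== SOURCE B (Python) =====
-- def sum_odd_int(input_list_a, input_list_b):
--     return sum(x for x in input_list_a if x % 2) + sum(x for x in input_list_b if x % 2)
-- ===== Notes on version B (the rewrite author's own statement) =====
-- stated objective: faster
-- what changed: Replaced the length-comparison branch with its lockstep pop(0)-from-the-shorter-list loop (pop(0) is O(n), making A quadratic, and A destructively empties the shorter list) by one direct linear sum of the odd elements of both lists; B does not mutate its arguments.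
import Mathlib
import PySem

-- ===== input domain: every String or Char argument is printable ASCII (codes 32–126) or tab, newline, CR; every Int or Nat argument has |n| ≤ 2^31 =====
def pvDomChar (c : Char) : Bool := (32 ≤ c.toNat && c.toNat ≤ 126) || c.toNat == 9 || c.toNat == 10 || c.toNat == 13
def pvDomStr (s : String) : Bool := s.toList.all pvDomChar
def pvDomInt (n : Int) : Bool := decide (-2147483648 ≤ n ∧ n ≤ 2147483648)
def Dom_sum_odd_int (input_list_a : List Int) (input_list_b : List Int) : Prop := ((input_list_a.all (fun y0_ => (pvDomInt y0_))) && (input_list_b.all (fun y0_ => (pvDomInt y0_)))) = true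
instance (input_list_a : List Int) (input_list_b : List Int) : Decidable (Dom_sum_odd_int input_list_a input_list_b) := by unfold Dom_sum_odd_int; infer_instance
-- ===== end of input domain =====

-- B replaces A's quadratic pop(0)-lockstep loop over the longer list by one linear sum of the
-- odd elements of both lists (faster; return value only: A also empties the shorter list in place, B does not mutate).

-- ===== PORT A =====
-- one loop body for both (symmetric) branches of A: state = (remaining other list, accumulator);
-- 'other.pop(0)' = taking the head of the state list.
def pvStepA (st : List Int × Int) (e : Int) : List Int × Int :=
  let st1 : List Int × Int :=
    match st.1 with
    | [] => st
    | x :: rest => if PySem.Int.mod x 2 == 0 then (rest, st.2) else (rest, st.2 + x)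
  if PySem.Int.mod e 2 == 0 then st1 else (st1.1, st1.2 + e)

def sum_odd_int (input_list_a : List Int) (input_list_b : List Int) : Int :=
  if input_list_a.length ≥ input_list_b.length then
    (input_list_a.foldl pvStepA (input_list_b, 0)).2
  else
    (input_list_b.foldl pvStepA (input_list_a, 0)).2

-- ===== PORT B =====
def sum_odd_int_alt (input_list_a : List Int) (input_list_b : List Int) : Int :=
  (input_list_a.filter (fun x => !(PySem.Int.mod x 2 == 0))).sum
    + (input_list_b.filter (fun x => !(PySem.Int.mod x 2 == 0))).sum

-- ===== PRECONDITION & SPEC =====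
def Spec_sum_odd_int (input_list_a : List Int) (input_list_b : List Int) (out : Int) : Prop := out = sum_odd_int_alt input_list_a input_list_b
instance (input_list_a : List Int) (input_list_b : List Int) (out : Int) : Decidable (Spec_sum_odd_int input_list_a input_list_b out) := by unfold Spec_sum_odd_int; infer_instance

-- ===== CLAIM (what is proved, stated in full; the proofs are below) =====
def Claim_equal_sum_odd_int : Prop := ∀ (input_list_a : List Int) (input_list_b : List Int), Dom_sum_odd_int input_list_a input_list_b → Spec_sum_odd_int input_list_a input_list_b (sum_odd_int input_list_a input_list_b)

-- ===== LEMMAS AND PROOFS =====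
def pvOddSum (xs : List Int) : Int := (xs.filter (fun x => !(PySem.Int.mod x 2 == 0))).sum

theorem pvOddSum_nil : pvOddSum [] = 0 := rfl

theorem pvOddSum_cons (x : Int) (xs : List Int) :
    pvOddSum (x :: xs) = (if (2 : Int) ∣ x then 0 else x) + pvOddSum xs := by
  by_cases h : (2 : Int) ∣ x <;> simp [pvOddSum, h]

theorem pvStepA_loop (a : List Int) : ∀ (b : List Int) (out : Int),
    (a.foldl pvStepA (b, out)).2 = out + pvOddSum a + pvOddSum (b.take a.length) := by
  induction a with
  | nil => intro b out; simp [pvOddSum_nil]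
  | cons e a ih =>
    intro b out
    cases b with
    | nil =>
      by_cases he : (2 : Int) ∣ e <;>
        simp [pvStepA, he, ih, pvOddSum_cons, pvOddSum_nil] <;> ring
    | cons x b =>
      by_cases hx : (2 : Int) ∣ x <;>
        by_cases he : (2 : Int) ∣ e <;>
          simp [pvStepA, hx, he, ih, pvOddSum_cons] <;> ring

theorem sum_odd_int_spec : Claim_equal_sum_odd_int := by
  intro a b _
  unfold Spec_sum_odd_int sum_odd_int sum_odd_int_alt
  by_cases h : a.length ≥ b.length
  · rw [if_pos h, pvStepA_loop, List.take_of_length_le h]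
    simp only [pvOddSum]; ring
  · rw [if_neg h, pvStepA_loop, List.take_of_length_le (by omega)]
    simp only [pvOddSum]; ring
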